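-- pv_equiv track=rewrite | github.com/linux-warrior/algorithms | sprint4/main/b.py | get_max_tie_length
-- ===== SOURCE A (Python) =====
-- from collections.abc import Iterable
--
-- def get_max_tie_length(results: Iterable[int]) -> int:
--     max_tie_length = 0
--
--     tied_intervals = {0: -1}
--     results_diff = 0
--
--     for i, result in enumerate(results):
--         results_diff += 1 if result else -1
--         tie_start = tied_intervals.get(results_diff)
--
--         if tie_start is None:
--             tied_intervals[results_diff] = i
--             continue
--
--         tie_length = i - tie_start
--
--         if tie_length > max_tie_length:
--             max_tie_length = tie_length
--
--     return max_tie_length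
-- ===== SOURCE B (Python) =====
-- from collections.abc import Iterable
--
-- def get_max_tie_length(results: Iterable[int]) -> int:
--     items = list(results)
--     best = 0
--     for l in range(len(items)):
--         balance = 0
--         for k, result in enumerate(items[l:]):
--             balance += 1 if result else -1
--             if balance == 0:
--                 best = max(best, k + 1)
--     return best
-- ===== Notes on version B (the rewrite author's own statement) =====
-- stated objective: alternative
-- what changed: A's single forward pass with a first-occurrence hashmap of running prefix balances is replaced by a brute-force nested scan: for every start index l, rerun a fresh balance counter over the suffix and record the subarray length whenever the balance returns to zero.
import Mathlib
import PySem

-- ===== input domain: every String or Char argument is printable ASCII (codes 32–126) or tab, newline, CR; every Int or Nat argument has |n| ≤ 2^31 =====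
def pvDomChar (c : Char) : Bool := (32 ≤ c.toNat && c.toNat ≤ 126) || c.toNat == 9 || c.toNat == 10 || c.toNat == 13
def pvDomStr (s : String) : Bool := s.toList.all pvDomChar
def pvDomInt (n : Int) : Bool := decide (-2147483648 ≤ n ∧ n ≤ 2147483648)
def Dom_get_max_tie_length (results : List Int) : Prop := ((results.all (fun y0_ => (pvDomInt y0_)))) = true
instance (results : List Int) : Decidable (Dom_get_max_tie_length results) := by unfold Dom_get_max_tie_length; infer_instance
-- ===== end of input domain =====

-- B replaces A's single-pass first-occurrence hashmap of prefix balances with a brute-force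
-- nested scan (for every start, rerun a balance counter over the suffix); objective: alternative, not faster.

-- ===== PORT A =====
-- A's loop body: state (max_tie_length, tied_intervals, results_diff), input (i, result)
def aStep (st : Int × PySem.Dict Int Int × Int) (ir : Int × Int) :
    Int × PySem.Dict Int Int × Int :=
  let diff' := st.2.2 + (if ir.2 ≠ 0 then 1 else -1)
  match st.2.1.get? diff' with
  | none => (st.1, st.2.1.insert diff' ir.1, diff')
  | some tie_start =>
    let tie_length := ir.1 - tie_start
    if tie_length > st.1 then (tie_length, st.2.1, diff') else (st.1, st.2.1, diff')

def get_max_tie_length (results : List Int) : Int :=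
  ((PySem.List.enumerate results 0).foldl aStep
    (0, PySem.Dict.ofList [((0 : Int), (-1 : Int))], 0)).1

-- ===== PORT B =====
-- B's inner loop body: state (balance, best), input the enumerated (k, result)
def innerStep (st : Int × Int) (kr : Int × Int) : Int × Int :=
  let balance := st.1 + (if kr.2 ≠ 0 then 1 else -1)
  let best := if balance = 0 then max st.2 (kr.1 + 1) else st.2
  (balance, best)

def get_max_tie_length_alt (results : List Int) : Int :=
  (PySem.List.pyRange 0 (results.length : Int) 1).foldl
    (fun best l =>
      ((PySem.List.enumerate (PySem.List.slice results (some l) none) 0).foldl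
        innerStep (0, best)).2)
    0

-- ===== PRECONDITION & SPEC =====
def Spec_get_max_tie_length (results : List Int) (out : Int) : Prop := out = get_max_tie_length_alt results
instance (results : List Int) (out : Int) : Decidable (Spec_get_max_tie_length results out) := by unfold Spec_get_max_tie_length; infer_instance

-- ===== CLAIM (what is proved, stated in full; the proofs are below) =====
def Claim_equal_get_max_tie_length : Prop := ∀ (results : List Int), Dom_get_max_tie_length results → Spec_get_max_tie_length results (get_max_tie_length results)

-- ===== LEMMAS AND PROOFS =====

-- the Python truthiness step: +1 for a win (any nonzero value), -1 for a loss
def pvStep (r : Int) : Int := if r ≠ 0 then 1 else -1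

-- sum of steps over a list
def pvSum (ys : List Int) : Int := (ys.map pvStep).sum

-- the list of running balances starting from b : [b, b+step x0, b+step x0+step x1, …]
def pvPref (b : Int) : List Int → List Int
  | [] => [b]
  | x :: xs => b :: pvPref (b + pvStep x) xs

-- the final balance
def pvLast (b : Int) : List Int → Int
  | [] => b
  | x :: xs => pvLast (b + pvStep x) xs

-- reference step used to characterise A's loop: running max of j - first-occurrence index
def bBest (prefixes : List Int) (best : Int) (jp : Int × Int) : Int :=
  max best (jp.1 - (((PySem.List.index? prefixes jp.2).getD 0 : Nat) : Int))

-- the candidate lengths produced by B's inner loop started at offset k0 with balance bal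
def cands (k0 bal : Int) : List Int → List Int
  | [] => []
  | y :: t =>
    (if bal + pvStep y = 0 then [k0 + 1] else []) ++ cands (k0 + 1) (bal + pvStep y) t

theorem pvPref_head (b : Int) (xs : List Int) : pvPref b xs = b :: (pvPref b xs).tail := by
  cases xs <;> rfl

theorem pvPref_length (b : Int) (xs : List Int) : (pvPref b xs).length = xs.length + 1 := by
  induction xs generalizing b with
  | nil => rfl
  | cons x t ih => simp [pvPref, ih]

theorem pvPref_getElem? (xs : List Int) : ∀ (b : Int) (j : Nat), j ≤ xs.length →
    (pvPref b xs)[j]? = some (b + pvSum (xs.take j)) := by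
  induction xs with
  | nil =>
    intro b j hj
    have hj0 : j = 0 := Nat.le_zero.mp hj
    subst hj0
    simp [pvPref, pvSum]
  | cons x t ih =>
    intro b j hj
    cases j with
    | zero => simp [pvPref, pvSum]
    | succ j =>
      rw [pvPref]
      simp only [List.getElem?_cons_succ]
      rw [ih (b + pvStep x) j (by simpa using hj)]
      simp [pvSum, add_assoc]

theorem pvSum_split (xs : List Int) (m j : Nat) :
    pvSum (xs.take (m + j)) = pvSum (xs.take m) + pvSum ((xs.drop m).take j) := by
  rw [List.take_add]
  simp [pvSum]

-- one step of A, written with the guarded update replaced by max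
theorem aStep_eval (m : Int) (d : PySem.Dict Int Int) (L i y : Int) :
    aStep (m, d, L) (i, y) =
      match d.get? (L + pvStep y) with
      | none => (m, d.insert (L + pvStep y) i, L + pvStep y)
      | some tie_start => (max m (i - tie_start), d, L + pvStep y) := by
  simp only [aStep, pvStep]
  cases hc : d.get? (L + (if y ≠ 0 then 1 else -1)) with
  | none => rfl
  | some t =>
    show (if i - t > m then (i - t, d, L + if y ≠ 0 then (1:Int) else -1)
        else (m, d, L + if y ≠ 0 then (1:Int) else -1))
      = (max m (i - t), d, L + if y ≠ 0 then (1:Int) else -1)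
    split
    · next hgt => rw [max_eq_right (by omega)]
    · next hle => rw [max_eq_left (by omega)]

-- main loop invariant for A, phrased as a fold of bBest over the remaining balances:
-- Pdone is the list of balances already reached, d maps each seen balance to its first
-- position minus one, m is the best tie length so far (nonnegative).
theorem loopA_spec (ys : List Int) : ∀ (Pdone : List Int) (h : Pdone ≠ []) (m : Int)
    (d : PySem.Dict Int Int), 0 ≤ m →
    (∀ v, d.get? v = (PySem.List.index? Pdone v).map (fun k : Nat => (k : Int) - 1)) →
    ((PySem.List.enumerate ys ((Pdone.length : Int) - 1)).foldl aStep (m, d, Pdone.getLast h)).1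
    = (PySem.List.enumerate ((pvPref (Pdone.getLast h) ys).tail) (Pdone.length : Int)).foldl
        (bBest (Pdone ++ (pvPref (Pdone.getLast h) ys).tail)) m := by
  induction ys with
  | nil =>
    intro Pdone h m d hm hd
    simp [pvPref, PySem.List.enumerate_nil]
  | cons y ys ih =>
    intro Pdone h m d hm hd
    rw [PySem.List.enumerate_cons, List.foldl_cons, aStep_eval]
    have htail : (pvPref (Pdone.getLast h) (y :: ys)).tail
        = (Pdone.getLast h + pvStep y) :: (pvPref (Pdone.getLast h + pvStep y) ys).tail := by
      rw [pvPref, List.tail_cons]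
      exact pvPref_head _ ys
    set v : Int := Pdone.getLast h + pvStep y with hvdef
    have hlast' : (Pdone ++ [v]).getLast (by simp) = v := List.getLast_concat
    have hlen : (((Pdone ++ [v]).length : Int)) - 1 = (Pdone.length : Int) := by simp
    have hstart : ((Pdone.length : Int) - 1) + 1 = (Pdone.length : Int) := by ring
    rw [htail, PySem.List.enumerate_cons, List.foldl_cons, hstart]
    cases hmem : PySem.List.index? Pdone v with
    | none =>
      have hvnot : v ∉ Pdone := (PySem.List.index?_eq_none_iff _ _).mp hmem
      have hget : d.get? v = none := by rw [hd, hmem]; rfl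
      rw [hget]
      -- the dict invariant carries over to Pdone ++ [v] after the insert
      have hd' : ∀ w, (d.insert v ((Pdone.length : Int) - 1)).get? w
          = (PySem.List.index? (Pdone ++ [v]) w).map (fun k : Nat => (k : Int) - 1) := by
        intro w
        rw [PySem.Dict.get?_insert]
        by_cases hw : w = v
        · subst hw
          rw [if_pos rfl, PySem.List.index?_append_singleton_self Pdone v hvnot]
          simp
        · rw [if_neg hw, hd]
          by_cases hwmem : w ∈ Pdone
          · rw [PySem.List.index?_append_of_mem [v] hwmem]
          · rw [(PySem.List.index?_eq_none_iff _ _).mpr hwmem,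
              (PySem.List.index?_eq_none_iff _ _).mpr]
            simp only [List.mem_append, List.mem_singleton]
            rintro (h2 | rfl)
            · exact hwmem h2
            · exact hw rfl
      have hIH := ih (Pdone ++ [v]) (by simp) m (d.insert v ((Pdone.length : Int) - 1)) hm hd'
      rw [hlast', hlen] at hIH
      rw [hIH]
      -- a first occurrence contributes tie length 0
      have hidx : PySem.List.index? (Pdone ++ v :: (pvPref v ys).tail) v
          = some Pdone.length :=
        (PySem.List.index?_eq_some_iff _ _ _).mpr
          ⟨Pdone, (pvPref v ys).tail, rfl, rfl, hvnot⟩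
      rw [show bBest (Pdone ++ v :: (pvPref v ys).tail) m ((Pdone.length : Int), v) = m by
        unfold bBest; rw [hidx]; simpa using hm]
      congr 2 <;> simp [List.append_assoc]
    | some k =>
      have hvmem : v ∈ Pdone :=
        (PySem.List.index?_isSome_iff Pdone v).mp (by rw [hmem]; rfl)
      have hget : d.get? v = some ((k : Int) - 1) := by rw [hd, hmem]; rfl
      rw [hget]
      -- appending an already-seen balance changes no first occurrence and no dict entry
      have hd' : ∀ w, d.get? w
          = (PySem.List.index? (Pdone ++ [v]) w).map (fun k : Nat => (k : Int) - 1) := by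
        intro w
        rw [hd]
        by_cases hwmem : w ∈ Pdone
        · rw [PySem.List.index?_append_of_mem [v] hwmem]
        · rw [(PySem.List.index?_eq_none_iff _ _).mpr hwmem,
            (PySem.List.index?_eq_none_iff _ _).mpr]
          simp only [List.mem_append, List.mem_singleton]
          rintro (h2 | rfl)
          · exact hwmem h2
          · exact hwmem hvmem
      have hm' : 0 ≤ max m (((Pdone.length : Int) - 1) - ((k : Int) - 1)) :=
        le_trans hm (le_max_left _ _)
      have hIH := ih (Pdone ++ [v]) (by simp) _ d hm' hd'
      rw [hlast', hlen] at hIH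
      rw [hIH]
      have hidx : PySem.List.index? (Pdone ++ v :: (pvPref v ys).tail) v = some k := by
        rw [PySem.List.index?_append_of_mem _ hvmem, hmem]
      rw [show bBest (Pdone ++ v :: (pvPref v ys).tail) m ((Pdone.length : Int), v)
          = max m (((Pdone.length : Int) - 1) - ((k : Int) - 1)) by
        unfold bBest; rw [hidx]; simp only [Option.getD_some]; congr 1; ring]
      congr 2 <;> simp [List.append_assoc]

-- the initial dict {0: -1} satisfies the invariant for Pdone = [0]
theorem init_dict_inv : ∀ w : Int, (PySem.Dict.ofList [((0 : Int), (-1 : Int))]).get? w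
    = (PySem.List.index? [(0 : Int)] w).map (fun k : Nat => (k : Int) - 1) := by
  intro w
  by_cases hw : w = 0
  · subst hw; rfl
  · rw [show PySem.Dict.ofList [((0 : Int), (-1 : Int))]
        = PySem.Dict.mk [((0 : Int), (-1 : Int))] from rfl,
      PySem.Dict.get?_mk_cons, if_neg (by simpa using fun h => hw h.symm),
      PySem.List.index?_cons_of_ne [] (fun h => hw h.symm)]
    rfl

-- A equals the running max of j - (first index of the j-th prefix balance)
theorem A_eq_ref (xs : List Int) :
    get_max_tie_length xs
      = (PySem.List.enumerate (pvPref 0 xs) 0).foldl (bBest (pvPref 0 xs)) 0 := by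
  unfold get_max_tie_length
  have hA := loopA_spec xs [(0 : Int)] (by simp) 0
    (PySem.Dict.ofList [((0 : Int), (-1 : Int))]) le_rfl init_dict_inv
  simp only [List.length_singleton, Nat.cast_one, List.getLast_singleton,
    List.singleton_append] at hA
  rw [show ((1 : Int) - 1) = 0 from rfl] at hA
  rw [hA]
  rw [pvPref_head 0 xs, PySem.List.enumerate_cons, List.foldl_cons]
  rw [show bBest (0 :: (pvPref 0 xs).tail) 0 (0, 0) = 0 by
    unfold bBest; rw [PySem.List.index?_cons_self]; simp]
  norm_num

-- B's inner loop is the running max of the candidate lengths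
theorem inner_spec (ys : List Int) : ∀ (k0 bal best : Int),
    ((PySem.List.enumerate ys k0).foldl innerStep (bal, best)).2
      = (cands k0 bal ys).foldl max best := by
  induction ys with
  | nil => intro k0 bal best; simp [cands, PySem.List.enumerate_nil]
  | cons y t ih =>
    intro k0 bal best
    rw [PySem.List.enumerate_cons, List.foldl_cons,
      show innerStep (bal, best) (k0, y)
        = (bal + pvStep y, if bal + pvStep y = 0 then max best (k0 + 1) else best) from rfl,
      ih, cands]
    by_cases hz : bal + pvStep y = 0
    · rw [if_pos hz, if_pos hz]; simp
    · rw [if_neg hz, if_neg hz]; simp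

-- what the candidate lengths mean: k0 + m + 1 for each m whose window sums to zero
theorem mem_cands (ys : List Int) : ∀ (k0 bal x : Int),
    x ∈ cands k0 bal ys ↔
      ∃ m : Nat, m < ys.length ∧ x = k0 + (m : Int) + 1 ∧ bal + pvSum (ys.take (m + 1)) = 0 := by
  induction ys with
  | nil => intro k0 bal x; simp [cands]
  | cons y t ih =>
    intro k0 bal x
    rw [cands]
    simp only [List.mem_append]
    constructor
    · rintro (hx | hx)
      · by_cases hz : bal + pvStep y = 0
        · rw [if_pos hz, List.mem_singleton] at hx
          exact ⟨0, by simp, by omega, by simpa [pvSum] using hz⟩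
        · rw [if_neg hz] at hx; simp at hx
      · obtain ⟨m, hm, hx, hs⟩ := (ih _ _ _).mp hx
        refine ⟨m + 1, by simpa using hm, by push_cast; omega, ?_⟩
        simp only [List.take_succ_cons, pvSum, List.map_cons, List.sum_cons] at hs ⊢
        omega
    · rintro ⟨m, hm, hx, hs⟩
      cases m with
      | zero =>
        left
        have hz : bal + pvStep y = 0 := by simpa [pvSum] using hs
        rw [if_pos hz, List.mem_singleton]
        omega
      | succ m =>
        right
        refine (ih _ _ _).mpr ⟨m, by simpa using hm, by push_cast at hx ⊢; omega, ?_⟩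
        simp only [List.take_succ_cons, pvSum, List.map_cons, List.sum_cons] at hs ⊢
        omega

-- the first occurrence of a value present at position j is at some i ≤ j with the same value
theorem index?_le (P : List Int) (j : Nat) (hj : j < P.length) :
    ∃ i : Nat, PySem.List.index? P P[j] = some i ∧ i ≤ j ∧
      ∃ hi : i < P.length, P[i] = P[j] := by
  have hmem : P[j] ∈ P := List.getElem_mem hj
  have hsome := (PySem.List.index?_isSome_iff P P[j]).mpr hmem
  obtain ⟨i, hi⟩ := Option.isSome_iff_exists.mp hsome
  obtain ⟨hilen, hival, hfirst⟩ := PySem.List.getElem_of_index?_eq_some hi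
  refine ⟨i, hi, ?_, hilen, hival⟩
  by_contra hgt
  exact hfirst j (by omega) rfl

-- generic bounds for a running max over a list of candidates
theorem fmax_le (L : List Int) : ∀ (a c : Int), a ≤ c → (∀ x ∈ L, x ≤ c) →
    L.foldl max a ≤ c := by
  induction L with
  | nil => intro a c ha _; simpa using ha
  | cons x t ih =>
    intro a c ha hx
    rw [List.foldl_cons]
    exact ih _ c (max_le ha (hx x (by simp))) (fun y hy => hx y (by simp [hy]))

-- generic bounds for the outer fold: best ↦ running max of (C l) over best
theorem outer_init_le (C : Int → List Int) (L : List Int) : ∀ (a : Int),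
    a ≤ L.foldl (fun b l => (C l).foldl max b) a := by
  induction L with
  | nil => intro a; simp
  | cons x t ih =>
    intro a
    rw [List.foldl_cons]
    exact le_trans (PySem.List.le_foldl_max (C x) a).1 (ih _)

theorem outer_mem_le (C : Int → List Int) (L : List Int) : ∀ (a l x : Int),
    l ∈ L → x ∈ C l → x ≤ L.foldl (fun b l => (C l).foldl max b) a := by
  induction L with
  | nil => intro a l x h; simp at h
  | cons h t ih =>
    intro a l x hl hx
    rw [List.foldl_cons]
    rcases List.mem_cons.mp hl with rfl | hl
    · exact le_trans ((PySem.List.le_foldl_max (C l) a).2 x hx) (outer_init_le C t _)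
    · exact ih _ l x hl hx

theorem outer_le (C : Int → List Int) (L : List Int) : ∀ (a c : Int), a ≤ c →
    (∀ l ∈ L, ∀ x ∈ C l, x ≤ c) → L.foldl (fun b l => (C l).foldl max b) a ≤ c := by
  induction L with
  | nil => intro a c ha _; simpa using ha
  | cons h t ih =>
    intro a c ha hx
    rw [List.foldl_cons]
    exact ih _ c (fmax_le (C h) a c ha (hx h (by simp)))
      (fun l hl x hxl => hx l (by simp [hl]) x hxl)

-- B as an outer fold of candidate maxima over the start indices
theorem B_eq_outer (xs : List Int) :
    get_max_tie_length_alt xs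
      = (PySem.List.pyRange 0 (xs.length : Int) 1).foldl
          (fun b l => (cands 0 0 (xs.drop l.toNat)).foldl max b) 0 := by
  unfold get_max_tie_length_alt
  apply PySem.List.foldl_congr_mem
  intro b l hl
  have hl0 : 0 ≤ l := ((PySem.List.mem_pyRange_one).mp hl).1
  rw [PySem.List.slice_from xs hl0, inner_spec]

-- the j-th prefix balance is the step sum of the first j results
theorem pref_val (xs : List Int) (j : Nat) (hj : j < (pvPref 0 xs).length) :
    (pvPref 0 xs)[j] = pvSum (xs.take j) := by
  have hj' : j ≤ xs.length := by
    have := pvPref_length 0 xs; omega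
  have h := pvPref_getElem? xs 0 j hj'
  rw [List.getElem?_eq_getElem hj] at h
  simpa using Option.some.inj h

-- ===== VERDICT (by name: the statement is the Claim_ definition above) =====
theorem get_max_tie_length_spec : Claim_equal_get_max_tie_length := by
  intro xs _
  unfold Spec_get_max_tie_length
  rw [A_eq_ref, B_eq_outer]
  set P := pvPref 0 xs with hP
  set n := xs.length with hn
  have hPlen : P.length = n + 1 := pvPref_length 0 xs
  -- A's side as a running max of a projection over the enumerated prefixes
  rw [show (PySem.List.enumerate P 0).foldl (bBest P) 0
      = ((PySem.List.enumerate P 0).map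
          (fun jp => jp.1 - (((PySem.List.index? P jp.2).getD 0 : Nat) : Int))).foldl max 0 from
    by rw [List.foldl_map]; rfl]
  apply le_antisymm
  · -- every A-candidate ≤ B's value
    apply fmax_le _ 0 _ (outer_init_le _ _ 0)
    intro x hx
    obtain ⟨jp, hjp, rfl⟩ := List.mem_map.mp hx
    obtain ⟨j, hjP, rfl⟩ := (PySem.List.mem_enumerate_iff _ _ _).mp hjp
    obtain ⟨i, hidx, hij, hiP, hival⟩ := index?_le P j hjP
    rw [hidx]
    simp only [Option.getD_some, zero_add]
    rcases Nat.eq_or_lt_of_le hij with rfl | hlt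
    · simp only [sub_self]
      exact outer_init_le _ _ 0
    · -- the pair (i, j) yields the candidate j - i at start index i
      apply outer_mem_le _ _ 0 (i : Int)
      · rw [PySem.List.mem_pyRange_one]
        constructor
        · omega
        · have : j ≤ n := by omega
          omega
      · rw [mem_cands]
        refine ⟨j - i - 1, by simp only [Int.toNat_natCast, List.length_drop]; omega, ?_, ?_⟩
        · omega
        · have hsplit := pvSum_split xs i (j - i)
          rw [show i + (j - i) = j by omega] at hsplit
          have hval_i := pref_val xs i hiP
          have hval_j := pref_val xs j hjP
          rw [hival, hval_j] at hval_i
          simp only [Int.toNat_natCast, zero_add,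
            show j - i - 1 + 1 = j - i by omega]
          omega
  · -- every B-candidate ≤ A's value
    apply outer_le _ _ 0 _ ?hinit
    case hinit =>
      exact (PySem.List.le_foldl_max _ 0).1
    intro l hl x hx
    have hl' := (PySem.List.mem_pyRange_one).mp hl
    obtain ⟨m, hm, rfl, hs⟩ := (mem_cands _ _ _ _).mp hx
    set lN := l.toNat with hlN
    have hlNn : lN < n := by
      simp only [List.length_drop] at hm; omega
    have hmlt : lN + (m + 1) ≤ n := by
      simp only [List.length_drop] at hm; omega
    set j := lN + m + 1 with hj
    have hjP : j < P.length := by omega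
    have hlP : lN < P.length := by omega
    -- prefix balances at j and lN agree
    have hsplit := pvSum_split xs lN (m + 1)
    have heq : P[j] = P[lN] := by
      rw [pref_val xs j hjP, pref_val xs lN hlP, hj,
        show lN + m + 1 = lN + (m + 1) from by omega, hsplit]
      omega
    obtain ⟨i, hidx, hij, hiP, hival⟩ := index?_le P j hjP
    have hile : i ≤ lN := by
      by_contra hgt
      obtain ⟨_, _, hfirst⟩ := PySem.List.getElem_of_index?_eq_some hidx
      exact hfirst lN (by omega) (heq.symm)
    -- the A-candidate at position j dominates
    have hmem : ((j : Int) - (i : Int)) ∈ (PySem.List.enumerate P 0).map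
        (fun jp => jp.1 - (((PySem.List.index? P jp.2).getD 0 : Nat) : Int)) := by
      apply List.mem_map.mpr
      refine ⟨((j : Int), P[j]), (PySem.List.mem_enumerate_iff _ _ _).mpr ⟨j, hjP, by simp⟩, ?_⟩
      simp only [PySem.List.index?_eq_idxOf?] at hidx
      simp [hidx]
    have hle := (PySem.List.le_foldl_max _ 0).2 _ hmem
    have : (0 : Int) + (m : Int) + 1 ≤ (j : Int) - (i : Int) := by
      have : (l.toNat : Int) = l := Int.toNat_of_nonneg hl'.1
      omega
    omega
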